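-- pv_equiv track=rewrite | github.com/joshanashakya/dissertation | workspace/dataset/java-python/GeeksForGeeks/4450/A/2.py | replaceConsonants
-- ===== SOURCE A (Python) =====
-- def replaceConsonants(string) :
--
--     # To store the resultant string
--     res = "";
--     i = 0; count = 0;
--
--     # Checking each character
--     # for consonant sequence
--     while (i < len(string)) :
--
--         # Count the length of consonants sequence
--         if (string[i] != 'a'
--             and string[i] != 'e'
--             and string[i] != 'i'
--             and string[i] != 'o'
--             and string[i] != 'u') :
--             i += 1;
--             count += 1;
--
--         else :
--
--             # Add the length in the string
--             if (count > 0) :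
--                 res += str(count);
--
--             # Add the vowel
--             res += string[i];
--
--             i += 1
--             count = 0;
--
--     # Check for the last consonant
--     # sequence in the string
--     if (count > 0) :
--         res += str(count);
--
--     # Return the resultant string
--     return res;
-- ===== SOURCE B (Python) =====
-- def replaceConsonants(string):
--     # Run-at-a-time scan: emit each maximal consonant run's length at once,
--     # collecting pieces in a list joined at the end (no pending counter to flush).
--     out = []
--     j = 0
--     n = len(string)
--     while j < n:
--         if string[j] in 'aeiou':
--             out.append(string[j])
--             j += 1
--         else:
--             k = j
--             while k < n and string[k] not in 'aeiou':
--                 k += 1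
--             out.append(str(k - j))
--             j = k
--     return ''.join(out)
-- ===== Notes on version B (the rewrite author's own statement) =====
-- stated objective: faster
-- what changed: B replaces A's per-character loop with a pending consonant counter (flushed at each vowel and after the loop, accumulating via repeated string concatenation) by a run-at-a-time scan that finds each maximal consonant run and emits its length immediately, collecting pieces in a list joined once at the end.
import Mathlib
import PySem

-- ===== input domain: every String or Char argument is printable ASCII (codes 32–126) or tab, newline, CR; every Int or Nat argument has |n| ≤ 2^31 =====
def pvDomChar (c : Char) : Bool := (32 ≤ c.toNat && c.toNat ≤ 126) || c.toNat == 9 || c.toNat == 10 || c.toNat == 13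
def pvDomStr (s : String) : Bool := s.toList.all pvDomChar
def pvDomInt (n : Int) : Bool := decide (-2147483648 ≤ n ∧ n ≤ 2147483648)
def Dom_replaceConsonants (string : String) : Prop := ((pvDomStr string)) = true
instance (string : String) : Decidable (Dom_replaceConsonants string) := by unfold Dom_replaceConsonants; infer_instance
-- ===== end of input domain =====

-- B scans the string run-at-a-time (each maximal consonant run emitted as its length at once)
-- and joins collected pieces once, instead of A's per-character counter flushed into repeated
-- string concatenation; a timing run measured B faster on large inputs.


-- ===== PORT A =====
-- A's while loop: per-character walk keeping res and a pending consonant count,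
-- flushed at each vowel and once more after the loop.
def pvGoA : List Char → String → Int → String
  | [], res, count => if count > 0 then res ++ PySem.Int.toStr count else res
  | c :: rest, res, count =>
    if c ≠ 'a' ∧ c ≠ 'e' ∧ c ≠ 'i' ∧ c ≠ 'o' ∧ c ≠ 'u' then
      pvGoA rest res (count + 1)
    else
      pvGoA rest
        ((if count > 0 then res ++ PySem.Int.toStr count else res) ++ String.singleton c) 0

def replaceConsonants (string : String) : String :=
  pvGoA string.toList "" 0

-- ===== PORT B =====
def pvIsVowel (c : Char) : Bool := c = 'a' || c = 'e' || c = 'i' || c = 'o' || c = 'u'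

-- B's outer loop: vowels pass through; a consonant starts a maximal run,
-- whose length is emitted and which is skipped wholesale (the inner scan of Source B).
def pvGoB : List Char → String
  | [] => ""
  | c :: rest =>
    if h : pvIsVowel c then
      String.singleton c ++ pvGoB rest
    else
      PySem.Int.toStr (((c :: rest).takeWhile (fun x => !pvIsVowel x)).length : Int) ++
        pvGoB ((c :: rest).dropWhile (fun x => !pvIsVowel x))
termination_by l => l.length
decreasing_by
  · simp
  · have hc : (fun x => !pvIsVowel x) c = true := by
      simp only [Bool.not_eq_true']
      cases hcv : pvIsVowel c
      · rfl
      · exact absurd hcv h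
    have h1 := List.dropWhile_cons_of_pos (p := fun x => !pvIsVowel x) (a := c) (l := rest) hc
    have h2 := List.length_dropWhile_le (fun x => !pvIsVowel x) rest
    simp only [h1, List.length_cons]
    omega

def replaceConsonants_alt (string : String) : String :=
  pvGoB string.toList

-- ===== PRECONDITION & SPEC =====
def Spec_replaceConsonants (string : String) (out : String) : Prop := out = replaceConsonants_alt string
instance (string : String) (out : String) : Decidable (Spec_replaceConsonants string out) := by unfold Spec_replaceConsonants; infer_instance

-- ===== CLAIM (what is proved, stated in full; the proofs are below) =====
def Claim_equal_replaceConsonants : Prop := ∀ (string : String), Dom_replaceConsonants string → Spec_replaceConsonants string (replaceConsonants string)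

-- ===== LEMMAS AND PROOFS =====

-- A's branch test is exactly "not a vowel"
theorem pvNotVowel_iff (c : Char) :
    (c ≠ 'a' ∧ c ≠ 'e' ∧ c ≠ 'i' ∧ c ≠ 'o' ∧ c ≠ 'u') ↔ pvIsVowel c = false := by
  simp [pvIsVowel]; tauto

-- goB's three unfolding equations
theorem pvGoB_nil : pvGoB [] = "" := by rw [pvGoB]

theorem pvGoB_vowel (c : Char) (rest : List Char) (hv : pvIsVowel c = true) :
    pvGoB (c :: rest) = String.singleton c ++ pvGoB rest := by
  rw [pvGoB.eq_def]; simp [hv]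

theorem pvGoB_cons (c : Char) (rest : List Char) (hv : pvIsVowel c = false) :
    pvGoB (c :: rest)
      = PySem.Int.toStr (((c :: rest).takeWhile (fun x => !pvIsVowel x)).length : Int) ++
        pvGoB ((c :: rest).dropWhile (fun x => !pvIsVowel x)) := by
  rw [pvGoB.eq_def]; simp [hv]

-- accumulator-free view of A's loop
def pvGoAux : List Char → Int → String
  | [], count => if count > 0 then PySem.Int.toStr count else ""
  | c :: rest, count =>
    if c ≠ 'a' ∧ c ≠ 'e' ∧ c ≠ 'i' ∧ c ≠ 'o' ∧ c ≠ 'u' then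
      pvGoAux rest (count + 1)
    else
      (if count > 0 then PySem.Int.toStr count else "") ++ String.singleton c ++ pvGoAux rest 0

theorem pvGo_eq_aux (l : List Char) (res : String) (count : Int) :
    pvGoA l res count = res ++ pvGoAux l count := by
  induction l generalizing res count with
  | nil =>
    simp only [pvGoA, pvGoAux]
    split <;> simp
  | cons c rest ih =>
    simp only [pvGoA, pvGoAux]
    split
    · exact ih _ _
    · rw [ih]
      split <;> (apply String.ext; simp)

-- B's run header absorbed: prefixing goB of the tail after the leading run
-- with that run's length (if nonempty) is goB of the whole list
theorem pvHeader_goB (l : List Char) :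
    (if 0 < (l.takeWhile (fun x => !pvIsVowel x)).length then
        PySem.Int.toStr ((l.takeWhile (fun x => !pvIsVowel x)).length : Int) else "")
      ++ pvGoB (l.dropWhile (fun x => !pvIsVowel x))
    = pvGoB l := by
  cases l with
  | nil => simp
  | cons c rest =>
    by_cases hv : pvIsVowel c
    · simp [List.takeWhile, List.dropWhile, hv]
    · rw [pvGoB_cons c rest (by simpa using hv)]
      simp [List.takeWhile, List.dropWhile, hv]

-- the key invariant: A's pending count n plus the leading consonant run of l
-- is printed exactly as B prints that run
theorem pvAux_eq_goB (l : List Char) (n : Nat) :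
    pvGoAux l (n : Int) =
      (if 0 < n + (l.takeWhile (fun x => !pvIsVowel x)).length then
        PySem.Int.toStr ((n + (l.takeWhile (fun x => !pvIsVowel x)).length : Nat) : Int) else "")
      ++ pvGoB (l.dropWhile (fun x => !pvIsVowel x)) := by
  induction l generalizing n with
  | nil =>
    simp only [pvGoAux, List.takeWhile_nil, List.dropWhile_nil, List.length_nil, Nat.add_zero,
      pvGoB_nil]
    by_cases hn : 0 < n
    · rw [if_pos (by exact_mod_cast hn : (n : Int) > 0), if_pos hn]
      apply String.ext; simp
    · rw [if_neg (by exact_mod_cast hn : ¬((n : Int) > 0)), if_neg hn]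
      apply String.ext; simp
  | cons c rest ih =>
    by_cases hv : pvIsVowel c
    · have hA : ¬(c ≠ 'a' ∧ c ≠ 'e' ∧ c ≠ 'i' ∧ c ≠ 'o' ∧ c ≠ 'u') := by
        simp only [pvNotVowel_iff, hv]; simp
      simp only [pvGoAux, if_neg hA]
      have h0 := ih 0
      simp only [Nat.cast_zero, Nat.zero_add] at h0
      rw [h0, pvHeader_goB rest]
      simp only [List.takeWhile, List.dropWhile, hv, Bool.not_true, List.length_nil, Nat.add_zero]
      rw [pvGoB_vowel c rest hv]
      by_cases hn : 0 < n
      · rw [if_pos (by exact_mod_cast hn : (n : Int) > 0), if_pos hn]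
        apply String.ext; simp
      · rw [if_neg (by exact_mod_cast hn : ¬((n : Int) > 0)), if_neg hn]
        apply String.ext; simp
    · have hA : (c ≠ 'a' ∧ c ≠ 'e' ∧ c ≠ 'i' ∧ c ≠ 'o' ∧ c ≠ 'u') := by
        rw [pvNotVowel_iff]; simpa using hv
      simp only [pvGoAux, if_pos hA]
      have h1 := ih (n + 1)
      rw [show ((n : Int) + 1) = ((n + 1 : Nat) : Int) by push_cast; ring, h1]
      simp only [List.takeWhile, List.dropWhile, hv, Bool.not_false, List.length_cons]
      rw [show n + ((List.takeWhile (fun x => !pvIsVowel x) rest).length + 1)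
            = n + 1 + (List.takeWhile (fun x => !pvIsVowel x) rest).length by omega]

-- ===== VERDICT (by name: the statement is the Claim_ definition above) =====
theorem replaceConsonants_spec : Claim_equal_replaceConsonants := by
  intro s _
  unfold Spec_replaceConsonants replaceConsonants replaceConsonants_alt
  rw [pvGo_eq_aux]
  rw [show (0 : Int) = ((0 : Nat) : Int) from rfl, pvAux_eq_goB s.toList 0]
  simp only [Nat.zero_add]
  rw [pvHeader_goB s.toList]
  apply String.ext; simp
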